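-- pv_equiv track=rewrite | github.com/ShuaLee/finpro | apps/external_data/providers/fmp/crypto/parsers.py | split_crypto_pair
-- ===== SOURCE A (Python) =====
-- from typing import NamedTuple
--
-- class CryptoPair(NamedTuple):
--     base_symbol: str
--     quote_currency: str
--
-- KNOWN_QUOTES = (
--     "USDT",
--     "USDC",
--     "USD",
--     "EUR",
--     "GBP",
-- )
--
-- def split_crypto_pair(pair_symbol: str) -> CryptoPair:
--     """
--     Split a crypto pair symbol into base + quote currency.
--
--     Examples:
--         BTCUSD  -> (BTC, USD)
--         ETHUSDT -> (ETH, USDT)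
--         ETHEUR  -> (ETH, EUR)
--     """
--     if not pair_symbol:
--         raise ValueError("Empty crypto pair symbol")
--
--     pair = pair_symbol.upper().strip()
--
--     for quote in KNOWN_QUOTES:
--         if pair.endswith(quote) and len(pair) > len(quote):
--             return CryptoPair(
--                 base_symbol=pair[:-len(quote)],
--                 quote_currency=quote,
--             )
--
--     raise ValueError(f"Unrecognized crypto pair symbol: {pair_symbol}")
-- ===== SOURCE B (Python) =====
-- from typing import NamedTuple
--
-- class CryptoPair(NamedTuple):
--     base_symbol: str
--     quote_currency: str
--
-- QUOTE_SET = frozenset({"USDT", "USDC", "USD", "EUR", "GBP"})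
--
-- def split_crypto_pair(pair_symbol: str) -> CryptoPair:
--     if not pair_symbol:
--         raise ValueError("Empty crypto pair symbol")
--
--     pair = pair_symbol.upper().strip()
--
--     # scan split positions of the string (longest suffix first) instead of
--     # scanning the list of known quotes: the suffix pair[i:] is tested for
--     # membership in the quote set; i >= 1 keeps the base non-empty.
--     for i in range(1, len(pair)):
--         if pair[i:] in QUOTE_SET:
--             return CryptoPair(base_symbol=pair[:i], quote_currency=pair[i:])
--
--     raise ValueError(f"Unrecognized crypto pair symbol: {pair_symbol}")
-- ===== Notes on version B (the rewrite author's own statement) =====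
-- stated objective: alternative
-- what changed: B scans the split positions of the normalized pair string from the longest suffix down, testing each suffix pair[i:] for membership in a single frozenset of known quotes, instead of A's loop over the list of quotes with an endswith test per quote.
import Mathlib
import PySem

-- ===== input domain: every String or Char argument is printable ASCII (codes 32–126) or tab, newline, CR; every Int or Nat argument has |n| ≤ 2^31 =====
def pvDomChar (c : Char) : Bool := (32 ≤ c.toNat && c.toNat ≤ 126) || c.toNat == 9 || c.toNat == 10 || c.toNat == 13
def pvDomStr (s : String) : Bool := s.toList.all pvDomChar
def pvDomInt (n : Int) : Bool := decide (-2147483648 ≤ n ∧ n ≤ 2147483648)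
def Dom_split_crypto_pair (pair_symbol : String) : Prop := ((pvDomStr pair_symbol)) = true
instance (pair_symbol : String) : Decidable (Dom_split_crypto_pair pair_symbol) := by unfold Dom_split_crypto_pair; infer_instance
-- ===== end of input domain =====

-- B scans the split positions of the normalized pair string (longest suffix first) and tests
-- each suffix for membership in one set of known quotes, instead of A's per-quote endswith scan
-- over the list of quotes (objective: alternative).


-- ===== PORT A =====
def pvKnownQuotes : List String := ["USDT", "USDC", "USD", "EUR", "GBP"]

-- the 'for quote in KNOWN_QUOTES' loop; [] = fall-through (Python raises, outside Pre_)
def pvLoopA (pair : String) : List String → String × String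
  | [] => ("", "")
  | q :: rest =>
      if PySem.Str.endswith pair q && decide (PySem.Str.len q < PySem.Str.len pair) then
        (PySem.Str.slice pair none (some (-(PySem.Str.len q))), q)
      else pvLoopA pair rest

def split_crypto_pair (pair_symbol : String) : String × String :=
  if pair_symbol = "" then ("", "")   -- Python raises ValueError; outside Pre_
  else
    let pair := PySem.Str.strip (PySem.Str.upper pair_symbol)
    pvLoopA pair pvKnownQuotes

-- ===== PORT B =====
def pvQuoteSet : List String := PySem.Set.ofList ["USDT", "USDC", "USD", "EUR", "GBP"]

-- the 'for i in range(1, len(pair))' loop over split positions; ("","") = fall-through (Python raises, outside Pre_)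
def pvLoopB (pair : String) (i : Nat) : String × String :=
  if _h : i < pair.toList.length then
    if pvQuoteSet.contains (PySem.Str.slice pair (some (i : Int)) none) then
      (PySem.Str.slice pair none (some (i : Int)),
       PySem.Str.slice pair (some (i : Int)) none)
    else pvLoopB pair (i + 1)
  else ("", "")
termination_by pair.toList.length - i
decreasing_by omega

def split_crypto_pair_alt (pair_symbol : String) : String × String :=
  if pair_symbol = "" then ("", "")   -- Python raises ValueError; outside Pre_
  else
    let pair := PySem.Str.strip (PySem.Str.upper pair_symbol)
    pvLoopB pair 1

-- ===== PRECONDITION & SPEC =====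
-- Pre_ = exactly the inputs on which Python A returns: some known quote is a proper suffix
-- of the normalized pair (otherwise both Pythons raise ValueError).
def Pre_split_crypto_pair (pair_symbol : String) : Prop :=
  (pvKnownQuotes.any (fun q =>
      PySem.Str.endswith (PySem.Str.strip (PySem.Str.upper pair_symbol)) q &&
      decide (PySem.Str.len q < PySem.Str.len (PySem.Str.strip (PySem.Str.upper pair_symbol)))))
    = true
instance (pair_symbol : String) : Decidable (Pre_split_crypto_pair pair_symbol) := by
  unfold Pre_split_crypto_pair; infer_instance

def pvWitness_split_crypto_pair : String := "btcUSDt "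

def Spec_split_crypto_pair (pair_symbol : String) (out : String × String) : Prop := out = split_crypto_pair_alt pair_symbol
instance (pair_symbol : String) (out : String × String) : Decidable (Spec_split_crypto_pair pair_symbol out) := by unfold Spec_split_crypto_pair; infer_instance

-- ===== CLAIM (what is proved, stated in full; the proofs are below) =====
def Claim_equal_split_crypto_pair : Prop := ∀ (pair_symbol : String), Dom_split_crypto_pair pair_symbol → Pre_split_crypto_pair pair_symbol → Spec_split_crypto_pair pair_symbol (split_crypto_pair pair_symbol)

-- ===== LEMMAS AND PROOFS =====

-- common target both loops compute: the unique split at a known quote suffix, longest first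
def pvT (pair : String) (i : Nat) : String × String :=
  let l := pair.toList
  let n := l.length
  if i + 4 ≤ n ∧ (l.drop (n - 4) = "USDT".toList ∨ l.drop (n - 4) = "USDC".toList) then
    (String.ofList (l.take (n - 4)), String.ofList (l.drop (n - 4)))
  else if i + 3 ≤ n ∧ (l.drop (n - 3) = "USD".toList ∨ l.drop (n - 3) = "EUR".toList ∨ l.drop (n - 3) = "GBP".toList) then
    (String.ofList (l.take (n - 3)), String.ofList (l.drop (n - 3)))
  else ("", "")

lemma pv_contains_iff (s : String) :
    pvQuoteSet.contains s = true ↔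
      (s.toList = "USDT".toList ∨ s.toList = "USDC".toList ∨ s.toList = "USD".toList ∨
       s.toList = "EUR".toList ∨ s.toList = "GBP".toList) := by
  have h : pvQuoteSet = ["USDT", "USDC", "USD", "EUR", "GBP"] := by decide
  simp only [h, List.contains_cons, List.contains_nil, Bool.or_eq_true, beq_iff_eq,
    Bool.false_eq_true, or_false, ← String.toList_inj]


-- slices of pair at a natural position, as take/drop
lemma pv_slice_from (pair : String) (i : Nat) :
    PySem.Str.slice pair (some (i : Int)) none = String.ofList (pair.toList.drop i) := by
  rw [← String.toList_inj]
  simp only [pysem, String.toList_ofList, PySem.Chars.slice_eq_listSlice,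
    PySem.List.slice_from_natCast]

lemma pv_slice_to (pair : String) (i : Nat) :
    PySem.Str.slice pair none (some (i : Int)) = String.ofList (pair.toList.take i) := by
  rw [← String.toList_inj]
  simp only [pysem, String.toList_ofList, PySem.Chars.slice_eq_listSlice,
    PySem.List.slice_to_natCast]

-- A's per-quote test (endswith + proper-length) as a drop equation
lemma pv_cond_iff (pair q : String) (m : Nat) (hm : q.toList.length = m) :
    ((PySem.Str.endswith pair q && decide (PySem.Str.len q < PySem.Str.len pair)) = true ↔
      (pair.toList.drop (pair.toList.length - m) = q.toList ∧ m + 1 ≤ pair.toList.length)) := by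
  rw [Bool.and_eq_true, decide_eq_true_eq]
  have h1 : PySem.Str.endswith pair q = true ↔
      pair.toList.drop (pair.toList.length - m) = q.toList := by
    rw [PySem.Str.endswith_eq, PySem.Chars.endswith_iff, List.suffix_iff_eq_drop, hm, eq_comm]
  have h2 : (PySem.Str.len q < PySem.Str.len pair) ↔ m + 1 ≤ pair.toList.length := by
    simp only [pysem]
    rw [hm]
    omega
  rw [h1, h2]

lemma pv_T_succ (pair : String) (i : Nat)
    (hnot : ¬(pair.toList.drop i = "USDT".toList ∨ pair.toList.drop i = "USDC".toList ∨
      pair.toList.drop i = "USD".toList ∨ pair.toList.drop i = "EUR".toList ∨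
      pair.toList.drop i = "GBP".toList)) :
    pvT pair i = pvT pair (i + 1) := by
  have k4 : (i + 4 ≤ pair.toList.length ∧
      (pair.toList.drop (pair.toList.length - 4) = "USDT".toList ∨
       pair.toList.drop (pair.toList.length - 4) = "USDC".toList)) ↔
      (i + 1 + 4 ≤ pair.toList.length ∧
      (pair.toList.drop (pair.toList.length - 4) = "USDT".toList ∨
       pair.toList.drop (pair.toList.length - 4) = "USDC".toList)) := by
    constructor
    · rintro ⟨hb, hc⟩
      refine ⟨?_, hc⟩
      rcases Nat.lt_or_ge (i + 4) pair.toList.length with h | h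
      · omega
      · exfalso
        apply hnot
        rw [show i = pair.toList.length - 4 by omega]
        rcases hc with h' | h'
        · exact Or.inl h'
        · exact Or.inr (Or.inl h')
    · rintro ⟨hb, hc⟩; exact ⟨by omega, hc⟩
  have k3 : (i + 3 ≤ pair.toList.length ∧
      (pair.toList.drop (pair.toList.length - 3) = "USD".toList ∨
       pair.toList.drop (pair.toList.length - 3) = "EUR".toList ∨
       pair.toList.drop (pair.toList.length - 3) = "GBP".toList)) ↔
      (i + 1 + 3 ≤ pair.toList.length ∧
      (pair.toList.drop (pair.toList.length - 3) = "USD".toList ∨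
       pair.toList.drop (pair.toList.length - 3) = "EUR".toList ∨
       pair.toList.drop (pair.toList.length - 3) = "GBP".toList)) := by
    constructor
    · rintro ⟨hb, hc⟩
      refine ⟨?_, hc⟩
      rcases Nat.lt_or_ge (i + 3) pair.toList.length with h | h
      · omega
      · exfalso
        apply hnot
        rw [show i = pair.toList.length - 3 by omega]
        rcases hc with h' | h' | h'
        · exact Or.inr (Or.inr (Or.inl h'))
        · exact Or.inr (Or.inr (Or.inr (Or.inl h')))
        · exact Or.inr (Or.inr (Or.inr (Or.inr h')))
    · rintro ⟨hb, hc⟩; exact ⟨by omega, hc⟩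
  simp only [pvT]
  simp only [k4, k3]

lemma pv_loopB_eq_T (pair : String) :
    ∀ k i, 1 ≤ i → pair.toList.length - i ≤ k → pvLoopB pair i = pvT pair i := by
  intro k
  induction k with
  | zero =>
      intro i h1 hk
      rw [pvLoopB, dif_neg (by omega)]
      simp only [pvT]
      rw [if_neg (by rintro ⟨h, -⟩; omega), if_neg (by rintro ⟨h, -⟩; omega)]
  | succ k ih =>
      intro i h1 hk
      by_cases hin : i < pair.toList.length
      · rw [pvLoopB, dif_pos hin]
        by_cases hc : pvQuoteSet.contains (PySem.Str.slice pair (some (i : Int)) none) = true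
        · rw [if_pos hc]
          have hmem := (pv_contains_iff _).1 hc
          rw [pv_slice_from, String.toList_ofList] at hmem
          rw [pv_slice_from, pv_slice_to]
          simp only [pvT]
          rcases hmem with h | h | h | h | h
          · have hn : pair.toList.length = i + 4 := by
              have hlen := congrArg List.length h
              simp only [List.length_drop] at hlen
              rw [show ("USDT".toList.length) = 4 from rfl] at hlen; omega
            rw [if_pos ⟨by omega, Or.inl (by rw [show pair.toList.length - 4 = i by omega]; exact h)⟩,
              show pair.toList.length - 4 = i by omega]
          · have hn : pair.toList.length = i + 4 := by
              have hlen := congrArg List.length h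
              simp only [List.length_drop] at hlen
              rw [show ("USDC".toList.length) = 4 from rfl] at hlen; omega
            rw [if_pos ⟨by omega, Or.inr (by rw [show pair.toList.length - 4 = i by omega]; exact h)⟩,
              show pair.toList.length - 4 = i by omega]
          · have hn : pair.toList.length = i + 3 := by
              have hlen := congrArg List.length h
              simp only [List.length_drop] at hlen
              rw [show ("USD".toList.length) = 3 from rfl] at hlen; omega
            rw [if_neg (by rintro ⟨hb, -⟩; omega),
              if_pos ⟨by omega, Or.inl (by rw [show pair.toList.length - 3 = i by omega]; exact h)⟩,
              show pair.toList.length - 3 = i by omega]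
          · have hn : pair.toList.length = i + 3 := by
              have hlen := congrArg List.length h
              simp only [List.length_drop] at hlen
              rw [show ("EUR".toList.length) = 3 from rfl] at hlen; omega
            rw [if_neg (by rintro ⟨hb, -⟩; omega),
              if_pos ⟨by omega, Or.inr (Or.inl (by rw [show pair.toList.length - 3 = i by omega]; exact h))⟩,
              show pair.toList.length - 3 = i by omega]
          · have hn : pair.toList.length = i + 3 := by
              have hlen := congrArg List.length h
              simp only [List.length_drop] at hlen
              rw [show ("GBP".toList.length) = 3 from rfl] at hlen; omega
            rw [if_neg (by rintro ⟨hb, -⟩; omega),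
              if_pos ⟨by omega, Or.inr (Or.inr (by rw [show pair.toList.length - 3 = i by omega]; exact h))⟩,
              show pair.toList.length - 3 = i by omega]
        · rw [if_neg hc, ih (i + 1) (by omega) (by omega)]
          refine (pv_T_succ pair i ?_).symm
          intro hd
          exact hc ((pv_contains_iff _).2 (by rw [pv_slice_from, String.toList_ofList]; exact hd))
      · rw [pvLoopB, dif_neg hin]
        simp only [pvT]
        rw [if_neg (by rintro ⟨h, -⟩; omega), if_neg (by rintro ⟨h, -⟩; omega)]

lemma pv_loopA_eq_T (pair : String) : pvLoopA pair pvKnownQuotes = pvT pair 1 := by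
  have c1 := pv_cond_iff pair "USDT" 4 rfl
  have c2 := pv_cond_iff pair "USDC" 4 rfl
  have c3 := pv_cond_iff pair "USD" 3 rfl
  have c4 := pv_cond_iff pair "EUR" 3 rfl
  have c5 := pv_cond_iff pair "GBP" 3 rfl
  have l4 : -(PySem.Str.len "USDT") = (-4 : Int) := by decide
  have l4c : -(PySem.Str.len "USDC") = (-4 : Int) := by decide
  have l3 : -(PySem.Str.len "USD") = (-3 : Int) := by decide
  have l3e : -(PySem.Str.len "EUR") = (-3 : Int) := by decide
  have l3g : -(PySem.Str.len "GBP") = (-3 : Int) := by decide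
  have s4 : PySem.Str.slice pair none (some (-4)) = String.ofList (pair.toList.take (pair.toList.length - 4)) := by
    rw [← String.toList_inj]
    simp only [pysem, String.toList_ofList, PySem.Chars.slice_eq_listSlice]
    rw [PySem.List.slice_to_neg_ofNat _ 4 (by omega)]
  have s3 : PySem.Str.slice pair none (some (-3)) = String.ofList (pair.toList.take (pair.toList.length - 3)) := by
    rw [← String.toList_inj]
    simp only [pysem, String.toList_ofList, PySem.Chars.slice_eq_listSlice]
    rw [PySem.List.slice_to_neg_ofNat _ 3 (by omega)]
  simp only [pvLoopA, pvKnownQuotes, pvT]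
  simp only [c1, c2, c3, c4, c5, l4, l4c, l3, l3e, l3g, s4, s3]
  by_cases p1 : pair.toList.drop (pair.toList.length - 4) = "USDT".toList ∧ 4 + 1 ≤ pair.toList.length
  · rw [if_pos p1, if_pos ⟨by omega, Or.inl p1.1⟩, Prod.mk.injEq]
    exact ⟨rfl, by rw [p1.1, String.ofList_toList]⟩
  · rw [if_neg p1]
    by_cases p2 : pair.toList.drop (pair.toList.length - 4) = "USDC".toList ∧ 4 + 1 ≤ pair.toList.length
    · rw [if_pos p2, if_pos ⟨by omega, Or.inr p2.1⟩, Prod.mk.injEq]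
      exact ⟨rfl, by rw [p2.1, String.ofList_toList]⟩
    · rw [if_neg p2, if_neg (show ¬(1 + 4 ≤ pair.toList.length ∧
        (pair.toList.drop (pair.toList.length - 4) = "USDT".toList ∨
         pair.toList.drop (pair.toList.length - 4) = "USDC".toList)) from by
        intro hq; rcases hq with ⟨hb, hd | hd⟩; exacts [p1 ⟨hd, by omega⟩, p2 ⟨hd, by omega⟩])]
      by_cases p3 : pair.toList.drop (pair.toList.length - 3) = "USD".toList ∧ 3 + 1 ≤ pair.toList.length
      · rw [if_pos p3, if_pos ⟨by omega, Or.inl p3.1⟩, Prod.mk.injEq]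
        exact ⟨rfl, by rw [p3.1, String.ofList_toList]⟩
      · rw [if_neg p3]
        by_cases p4 : pair.toList.drop (pair.toList.length - 3) = "EUR".toList ∧ 3 + 1 ≤ pair.toList.length
        · rw [if_pos p4, if_pos ⟨by omega, Or.inr (Or.inl p4.1)⟩, Prod.mk.injEq]
          exact ⟨rfl, by rw [p4.1, String.ofList_toList]⟩
        · rw [if_neg p4]
          by_cases p5 : pair.toList.drop (pair.toList.length - 3) = "GBP".toList ∧ 3 + 1 ≤ pair.toList.length
          · rw [if_pos p5, if_pos ⟨by omega, Or.inr (Or.inr p5.1)⟩, Prod.mk.injEq]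
            exact ⟨rfl, by rw [p5.1, String.ofList_toList]⟩
          · rw [if_neg p5,
              if_neg (show ¬(1 + 3 ≤ pair.toList.length ∧
        (pair.toList.drop (pair.toList.length - 3) = "USD".toList ∨
         pair.toList.drop (pair.toList.length - 3) = "EUR".toList ∨
         pair.toList.drop (pair.toList.length - 3) = "GBP".toList)) from by
        intro hq; rcases hq with ⟨hb, hd | hd | hd⟩; exacts [p3 ⟨hd, by omega⟩, p4 ⟨hd, by omega⟩, p5 ⟨hd, by omega⟩])]

theorem pv_main (pair_symbol : String) :
    split_crypto_pair pair_symbol = split_crypto_pair_alt pair_symbol := by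
  unfold split_crypto_pair split_crypto_pair_alt
  by_cases h : pair_symbol = ""
  · simp [h]
  · simp only [h, if_false]
    rw [pv_loopA_eq_T, pv_loopB_eq_T _ ((PySem.Str.strip (PySem.Str.upper pair_symbol)).toList.length) 1 le_rfl (by omega)]

-- ===== VERDICT (by name: the statement is the Claim_ definition above) =====
theorem split_crypto_pair_spec : Claim_equal_split_crypto_pair := by
  intro s _ _
  unfold Spec_split_crypto_pair
  exact pv_main s
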